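-- pv_equiv track=rewrite | github.com/mdheller/via3 | via/get_url/headers.py | _sort_list_by_exemplar
-- ===== SOURCE A (Python) =====
-- def _sort_list_by_exemplar(target, exemplar):
--     result = [None] * len(target)
--     sortable_keys = []
--     available_indexes = []
--
--     for index, key in enumerate(target):
--         if key in exemplar:
--             # The exemplar has an opinion on ordering, so this position is
--             # available to be ordered, but we don't know which key will get it
--             sortable_keys.append(key)
--             available_indexes.append(index)
--         else:
--             # If it's not in the exemplar, we have no information about where
--             # to put it, so just put it back in place
--             result[index] = key
--
--     # All the sortable keys should be re-ordered into their exemplar order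
--     sortable_keys.sort(key=exemplar.index)
--
--     # Then we can slot them back into the available indexes
--     for key, index in zip(sortable_keys, available_indexes):
--         result[index] = key
--
--     return result
-- ===== SOURCE B (Python) =====
-- def _sort_list_by_exemplar(target, exemplar):
--     # Counting-style distribution instead of a comparison sort:
--     # walk the exemplar's distinct keys in order and emit each present key
--     # count-many times, then stream that ordered list back into the sortable
--     # positions of target in one pass.
--     first = dict.fromkeys(exemplar)          # ordered dedup of exemplar, O(1) membership
--     counts = {}
--     for k in target:
--         if k in first:
--             counts[k] = counts.get(k, 0) + 1
--     ordered = []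
--     for e in first:
--         ordered.extend([e] * counts.get(e, 0))
--     it = iter(ordered)
--     return [next(it, k) if k in first else k for k in target]
-- ===== Notes on version B (the rewrite author's own statement) =====
-- stated objective: faster
-- what changed: Replaces A's per-element 'key in exemplar' scans plus a comparison sort keyed by exemplar.index with dict-based membership, a count per present key, and a counting-style distribution over the deduplicated exemplar streamed back into target in one pass.
import Mathlib
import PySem

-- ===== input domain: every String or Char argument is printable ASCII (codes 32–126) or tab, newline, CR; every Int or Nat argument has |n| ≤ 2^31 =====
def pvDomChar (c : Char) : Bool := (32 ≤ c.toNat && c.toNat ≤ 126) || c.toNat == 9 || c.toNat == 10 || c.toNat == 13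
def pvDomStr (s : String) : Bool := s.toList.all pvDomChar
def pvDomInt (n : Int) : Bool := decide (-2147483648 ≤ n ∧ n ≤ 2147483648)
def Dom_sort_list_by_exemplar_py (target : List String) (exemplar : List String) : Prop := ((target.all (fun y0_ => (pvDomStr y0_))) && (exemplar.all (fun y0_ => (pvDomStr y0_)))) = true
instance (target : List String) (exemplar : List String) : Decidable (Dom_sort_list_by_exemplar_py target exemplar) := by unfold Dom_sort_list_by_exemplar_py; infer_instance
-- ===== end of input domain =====

-- B replaces A's per-element exemplar scans and comparison sort (key=exemplar.index) by a
-- counting distribution over the deduplicated exemplar, streamed back into target in one pass.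

-- ===== PORT A =====
-- 'result[index] = key': the index always comes from enumerate(target), so 0 ≤ index < len(result)
-- and List.set at index.toNat is exact; every None slot is filled by one of the two loops,
-- so the final .getD default is never read.
def sort_list_by_exemplar_py (target : List String) (exemplar : List String) : List String :=
  let st := (PySem.List.enumerate target).foldl
    (fun (st : List (Option String) × List String × List Int) (p : Int × String) =>
      if exemplar.contains p.2 then
        (st.1, st.2.1 ++ [p.2], st.2.2 ++ [p.1])
      else
        (st.1.set p.1.toNat (some p.2), st.2.1, st.2.2))
    (List.replicate target.length none, [], [])
  let sortedKeys := PySem.List.sorted st.2.1 (fun k => (PySem.List.index? exemplar k).getD 0) false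
  let res := (sortedKeys.zip st.2.2).foldl (fun r q => r.set q.2.toNat (some q.1)) st.1
  res.map (fun o => o.getD "")

-- ===== PORT B =====
-- 'next(it, k)' over the iterator of `ordered`: take the next ordered key if any remain, else k.
def pvFillAlt (ordered : List String) (target : List String) (first : List String) : List String :=
  match target, ordered with
  | [], _ => []
  | k :: ts, os =>
    if first.contains k then
      match os with
      | o :: os' => o :: pvFillAlt os' ts first
      | [] => k :: pvFillAlt [] ts first
    else k :: pvFillAlt os ts first

def sort_list_by_exemplar_py_alt (target : List String) (exemplar : List String) : List String :=
  let first := PySem.List.dedup exemplar          -- dict.fromkeys(exemplar)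
  let counts := target.foldl
    (fun (c : PySem.Dict String Int) k => if first.contains k then c.insert k (c.getD k 0 + 1) else c)
    PySem.Dict.empty
  let ordered := first.foldl (fun acc e => acc ++ List.replicate (counts.getD e 0).toNat e) []
  pvFillAlt ordered target first

-- ===== PRECONDITION & SPEC =====
def Spec_sort_list_by_exemplar_py (target : List String) (exemplar : List String) (out : List String) : Prop := out = sort_list_by_exemplar_py_alt target exemplar
instance (target : List String) (exemplar : List String) (out : List String) : Decidable (Spec_sort_list_by_exemplar_py target exemplar out) := by unfold Spec_sort_list_by_exemplar_py; infer_instance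

-- ===== CLAIM (what is proved, stated in full; the proofs are below) =====
def Claim_equal_sort_list_by_exemplar_py : Prop := ∀ (target : List String) (exemplar : List String), Dom_sort_list_by_exemplar_py target exemplar → Spec_sort_list_by_exemplar_py target exemplar (sort_list_by_exemplar_py target exemplar)

-- ===== LEMMAS AND PROOFS =====

-- the sort key of A: exemplar.index(k), defined wherever A evaluates it
def pvKey (ex : List String) (k : String) : Nat := (PySem.List.index? ex k).getD 0

-- A's first loop, result component
def pvR1 (ex : List String) (l : List (Int × String)) (r : List (Option String)) : List (Option String) :=
  l.foldl (fun r p => if ex.contains p.2 then r else r.set p.1.toNat (some p.2)) r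

-- A's second loop
def pvFillA (os : List String) (av : List Int) (r : List (Option String)) : List (Option String) :=
  (os.zip av).foldl (fun r q => r.set q.2.toNat (some q.1)) r

-- A's available indexes, in closed form
def pvAvL (ex : List String) (t : List String) (s : Int) : List Int :=
  ((PySem.List.enumerate t s).filter (fun p => ex.contains p.2)).map (·.1)

lemma pv_split (ex : List String) (l : List (Int × String))
    (r : List (Option String)) (sk : List String) (ai : List Int) :
    l.foldl
      (fun (st : List (Option String) × List String × List Int) (p : Int × String) =>
        if ex.contains p.2 then (st.1, st.2.1 ++ [p.2], st.2.2 ++ [p.1])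
        else (st.1.set p.1.toNat (some p.2), st.2.1, st.2.2)) (r, sk, ai)
    = (pvR1 ex l r,
       sk ++ (l.filter (fun p => ex.contains p.2)).map (·.2),
       ai ++ (l.filter (fun p => ex.contains p.2)).map (·.1)) := by
  induction l generalizing r sk ai with
  | nil => simp [pvR1]
  | cons p l ih =>
    by_cases h : ex.contains p.2
    · have h' : p.2 ∈ ex := by simpa using h
      rw [List.foldl_cons, if_pos h, ih]
      simp [pvR1, List.filter_cons, h']
    · have h' : ¬ p.2 ∈ ex := by simpa using h
      rw [List.foldl_cons, if_neg h, ih]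
      simp [pvR1, List.filter_cons, h']

lemma pv_contains_dedup (ex : List String) (k : String) :
    (PySem.List.dedup ex).contains k = ex.contains k := by
  simp [List.contains_iff_mem, PySem.List.mem_dedup]

lemma pv_sk_closed (ex t : List String) (s : Int) :
    ((PySem.List.enumerate t s).filter (fun p => ex.contains p.2)).map (·.2)
      = t.filter (fun k => ex.contains k) := by
  induction t generalizing s with
  | nil => simp [PySem.List.enumerate_nil]
  | cons k ts ih =>
    by_cases h : k ∈ ex
    · simpa [PySem.List.enumerate_cons, List.filter_cons, h] using ih (s + 1)
    · simpa [PySem.List.enumerate_cons, List.filter_cons, h] using ih (s + 1)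

lemma pv_mem_enum_bounds (t : List String) (s : Int) (p : Int × String) (hp : p ∈ PySem.List.enumerate t s) :
    s ≤ p.1 ∧ p.1 < s + t.length := by
  rcases (PySem.List.mem_enumerate_iff t s p).1 hp with ⟨k, hk, rfl⟩
  constructor <;> simp <;> omega

lemma pvR1_set_comm (ex : List String) (l : List (Int × String)) (r : List (Option String))
    (i : Nat) (v : Option String) (h : ∀ p ∈ l, p.1.toNat ≠ i) :
    pvR1 ex l (r.set i v) = (pvR1 ex l r).set i v := by
  induction l generalizing r with
  | nil => simp [pvR1]
  | cons p l ih =>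
    by_cases hc : ex.contains p.2
    · simp only [pvR1, List.foldl_cons, hc, if_pos]
      exact ih r (fun q hq => h q (by simp [hq]))
    · simp only [pvR1, List.foldl_cons, hc, if_neg, Bool.false_eq_true, not_false_iff]
      rw [List.set_comm v (some p.2) (fun hh => h p (by simp) hh.symm)]
      exact ih _ (fun q hq => h q (by simp [hq]))

lemma pv_key_inj (ex : List String) (a b : String) (ha : a ∈ ex) (hb : b ∈ ex)
    (h : pvKey ex a = pvKey ex b) : a = b := by
  rcases Option.isSome_iff_exists.1 ((PySem.List.index?_isSome_iff ex a).2 ha) with ⟨ka, hka⟩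
  rcases Option.isSome_iff_exists.1 ((PySem.List.index?_isSome_iff ex b).2 hb) with ⟨kb, hkb⟩
  rcases PySem.List.getElem_of_index?_eq_some hka with ⟨hla, hea, -⟩
  rcases PySem.List.getElem_of_index?_eq_some hkb with ⟨hlb, heb, -⟩
  have : ka = kb := by
    unfold pvKey at h
    rw [hka, hkb] at h
    simpa using h
  subst this
  rw [← hea, ← heb]

lemma pv_eq_of_perm (key : String → Nat) :
    ∀ (l₁ l₂ : List String), l₁.Perm l₂ →
    l₁.Pairwise (fun a b => key a ≤ key b) → l₂.Pairwise (fun a b => key a ≤ key b) →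
    (∀ a ∈ l₁, ∀ b ∈ l₁, key a = key b → a = b) → l₁ = l₂ := by
  intro l₁
  induction l₁ with
  | nil => intro l₂ hp _ _ _; exact hp.nil_eq
  | cons a t₁ ih =>
    intro l₂ hp h₁ h₂ hinj
    match l₂, hp with
    | [], hp => exact absurd hp (by simp)
    | b :: t₂, hp =>
      have hab : a = b := by
        have hbmem : b ∈ a :: t₁ := hp.symm.subset (by simp)
        have hamem : a ∈ b :: t₂ := hp.subset (by simp)
        apply hinj a (by simp) b hbmem
        rcases List.mem_cons.1 hbmem with hb | hb
        · rw [hb]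
        · rcases List.mem_cons.1 hamem with ha | ha
          · rw [ha]
          · exact le_antisymm (List.rel_of_pairwise_cons h₁ hb) (List.rel_of_pairwise_cons h₂ ha)
      subst hab
      have ht : t₁.Perm t₂ := hp.cons_inv
      have := ih t₂ ht (List.Pairwise.of_cons h₁) (List.Pairwise.of_cons h₂)
        (fun x hx y hy => hinj x (by simp [hx]) y (by simp [hy]))
      rw [this]

lemma pv_key_of_first (ex pre suf : List String) (x : String) (hx : x ∉ pre)
    (he : ex = pre ++ x :: suf) : pvKey ex x = pre.length := by
  have : PySem.List.index? ex x = some pre.length :=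
    (PySem.List.index?_eq_some_iff ex x pre.length).2 ⟨pre, suf, he, rfl, hx⟩
  unfold pvKey
  rw [this]
  rfl

lemma pv_key_lt_of_mem_pre (ex pre rest : List String) (a : String) (ha : a ∈ pre)
    (he : ex = pre ++ rest) : pvKey ex a < pre.length := by
  rcases Option.isSome_iff_exists.1 ((PySem.List.index?_isSome_iff pre a).2 ha) with ⟨k, hk⟩
  have h2 : PySem.List.index? ex a = some k := by
    rw [he, PySem.List.index?_append_of_mem rest ha, hk]
  rcases PySem.List.getElem_of_index?_eq_some hk with ⟨hlt, -, -⟩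
  unfold pvKey
  rw [h2]
  simpa using hlt

lemma pv_aux_pairwise (ex : List String) :
    ∀ (suf pre s : List String),
    ex = pre ++ suf → (∀ a, a ∈ s ↔ a ∈ pre) →
    s.Pairwise (fun a b => pvKey ex a < pvKey ex b) →
    (suf.foldl PySem.Set.add s).Pairwise (fun a b => pvKey ex a < pvKey ex b) := by
  intro suf
  induction suf with
  | nil => intro pre s _ _ hs; simpa using hs
  | cons x suf' ih =>
    intro pre s he hmem hs
    rw [List.foldl_cons]
    apply ih (pre ++ [x])
    · rw [he]; simp
    · intro a
      rw [PySem.Set.mem_add, hmem a]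
      simp [or_comm]
    · by_cases hx : PySem.Set.contains s x
      · have hadd : PySem.Set.add s x = s := by unfold PySem.Set.add; rw [if_pos hx]
        rw [hadd]; exact hs
      · have hadd : PySem.Set.add s x = s ++ [x] := by unfold PySem.Set.add; rw [if_neg hx]
        rw [hadd, List.pairwise_append]
        refine ⟨hs, by simp, ?_⟩
        intro a ha y hy
        have hy' : y = x := by simpa using hy
        have hxpre : x ∉ pre := fun hc => hx (by simpa [PySem.Set.contains] using (hmem x).2 hc)
        have h1 := pv_key_of_first ex pre suf' x hxpre he
        have h2 := pv_key_lt_of_mem_pre ex pre (x :: suf') a ((hmem a).1 ha) he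
        rw [hy']
        omega

lemma pv_dedup_pairwise (ex : List String) :
    (PySem.List.dedup ex).Pairwise (fun a b => pvKey ex a < pvKey ex b) := by
  have h : PySem.List.dedup ex = ex.foldl PySem.Set.add [] := by
    rw [PySem.List.dedup_eq_ofList, PySem.Set.ofList_eq_foldl]
  rw [h]
  exact pv_aux_pairwise ex ex [] [] rfl (by simp) (by simp)

lemma pv_flatMap_filter_perm :
    ∀ (D S : List String), D.Nodup →
    (D.flatMap (fun e => S.filter (fun x => x == e))).Perm (S.filter (fun x => D.contains x)) := by
  intro D
  induction D with
  | nil => intro S _; simp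
  | cons e D' ih =>
    intro S hnd
    rw [List.flatMap_cons]
    have hD' : D'.Nodup := hnd.of_cons
    have hpart := List.filter_append_perm (fun x => x == e) (S.filter (fun x => (e :: D').contains x))
    have h1 : (S.filter (fun x => (e :: D').contains x)).filter (fun x => x == e)
        = S.filter (fun x => x == e) := by
      rw [List.filter_filter]
      apply List.filter_congr
      intro x _
      by_cases hxe : x = e <;> simp [hxe]
    have h2 : (S.filter (fun x => (e :: D').contains x)).filter (fun x => !(x == e))
        = S.filter (fun x => D'.contains x) := by
      rw [List.filter_filter]
      apply List.filter_congr
      intro x _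
      by_cases hxe : x = e
      · subst hxe
        have hnotin : x ∉ D' := (List.nodup_cons.1 hnd).1
        simp [hnotin]
      · simp [hxe]
    refine (List.Perm.append_left _ (ih S hD')).trans ?_
    rw [← h1, ← h2]
    exact hpart

lemma pv_sorted_eq (ex t : List String) :
    PySem.List.sorted (t.filter (fun k => ex.contains k)) (fun k => (PySem.List.index? ex k).getD 0) false
      = (PySem.List.dedup ex).flatMap
          (fun e => List.replicate ((t.filter (fun k => ex.contains k)).count e) e) := by
  have hrep : ∀ (S : List String) (e : String),
      List.replicate (S.count e) e = S.filter (fun x => x == e) := by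
    intro S e; simpa using (List.filter_eq (l := S) e).symm
  set S := t.filter (fun k => ex.contains k) with hS
  set D := PySem.List.dedup ex with hD
  have hSex : ∀ x ∈ S, x ∈ ex := by
    intro x hx
    have := List.of_mem_filter hx
    simpa using this
  have hSD : ∀ x ∈ S, x ∈ D := by
    intro x hx; rw [hD, PySem.List.mem_dedup]; exact hSex x hx
  have hself : S.filter (fun x => D.contains x) = S := by
    rw [List.filter_eq_self]
    intro a ha; simpa using hSD a ha
  have hperm : (D.flatMap (fun e => List.replicate (S.count e) e)).Perm S := by
    have := pv_flatMap_filter_perm D S (by rw [hD]; exact PySem.List.nodup_dedup ex)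
    rw [hself] at this
    refine List.Perm.trans ?_ this
    apply List.Perm.of_eq
    exact List.flatMap_congr (fun e _ => hrep S e)
  have hpwD := pv_dedup_pairwise ex
  have hpw : (D.flatMap (fun e => List.replicate (S.count e) e)).Pairwise
      (fun a b => pvKey ex a ≤ pvKey ex b) := by
    rw [List.pairwise_flatMap]
    constructor
    · intro a _; rw [List.pairwise_replicate]; right; exact le_refl _
    · refine List.Pairwise.imp ?_ hpwD
      intro a b hab x hx y hy
      have hxa : x = a := List.eq_of_mem_replicate hx
      have hyb : y = b := List.eq_of_mem_replicate hy
      rw [hxa, hyb]; exact le_of_lt hab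
  have hkey : (fun k => (PySem.List.index? ex k).getD 0) = pvKey ex := rfl
  rw [hkey]
  apply pv_eq_of_perm (pvKey ex)
  · exact (PySem.List.sorted_perm S (pvKey ex) false).trans hperm.symm
  · exact PySem.List.sorted_pairwise S (pvKey ex)
  · exact hpw
  · intro a ha b hb hk
    rw [PySem.List.mem_sorted] at ha hb
    exact pv_key_inj ex a b (hSex a ha) (hSex b hb) hk

lemma pv_take_set (r : List (Option String)) (s : Nat) (v : Option String) (h : s < r.length) :
    (r.set s v).take (s + 1) = r.take s ++ [v] := by
  induction r generalizing s with
  | nil => simp at h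
  | cons a r ih =>
    cases s with
    | zero => simp
    | succ s =>
      have h' : s < r.length := by simpa using h
      simp [List.set_cons_succ, List.take_succ_cons, ih s h']

lemma pv_main (ex : List String) :
    ∀ (t os : List String) (s : Nat) (r : List (Option String)),
    r.length = s + t.length → os.length = (t.filter (fun k => ex.contains k)).length →
    (pvFillA os (pvAvL ex t (s : Int)) (pvR1 ex (PySem.List.enumerate t (s : Int)) r)).map (fun o => o.getD "")
      = (r.take s).map (fun o => o.getD "") ++ pvFillAlt os t (PySem.List.dedup ex) := by
  intro t
  induction t with
  | nil =>
    intro os s r hr _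
    simp only [PySem.List.enumerate_nil, pvAvL, pvR1, pvFillA, List.filter_nil, List.map_nil,
      List.zip_nil_right, List.foldl_nil, pvFillAlt]
    simp only [List.length_nil, Nat.add_zero] at hr
    rw [List.take_of_length_le (by omega)]
    simp
  | cons k ts ih =>
    intro os s r hr hos
    have hcast : (s : Int) + 1 = ((s + 1 : Nat) : Int) := by push_cast; ring
    by_cases hc : ex.contains k
    all_goals have hcm := hc
    · -- sortable position
      obtain ⟨o, os', rfl⟩ : ∃ o os', os = o :: os' := by
        cases os with
        | nil => exfalso; rw [List.filter_cons_of_pos hc] at hos; simp at hos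
        | cons o os' => exact ⟨o, os', rfl⟩
      have hc' : k ∈ ex := by simpa using hc
      have hav : pvAvL ex (k :: ts) (s : Int) = (s : Int) :: pvAvL ex ts ((s+1 : Nat) : Int) := by
        rw [pvAvL, PySem.List.enumerate_cons, hcast]
        simp [pvAvL, hc']
      have hr1 : pvR1 ex (PySem.List.enumerate (k :: ts) (s : Int)) r
          = pvR1 ex (PySem.List.enumerate ts ((s+1 : Nat) : Int)) r := by
        rw [PySem.List.enumerate_cons, pvR1, List.foldl_cons, if_pos hc, hcast]; rfl
      have hstep : pvFillA (o :: os') ((s : Int) :: pvAvL ex ts ((s+1 : Nat) : Int)) (pvR1 ex (PySem.List.enumerate ts ((s+1 : Nat) : Int)) r)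
          = pvFillA os' (pvAvL ex ts ((s+1 : Nat) : Int)) (pvR1 ex (PySem.List.enumerate ts ((s+1 : Nat) : Int)) (r.set s (some o))) := by
        rw [pvFillA, List.zip_cons_cons, List.foldl_cons]
        have : ((s : Int).toNat) = s := by simp
        rw [this]
        rw [← pvR1_set_comm ex _ r s (some o) ?_]
        · rfl
        · intro p hp
          have := pv_mem_enum_bounds ts ((s+1 : Nat) : Int) p hp
          omega
      simp only [List.length_cons] at hr
      rw [hav, hr1, hstep, ih os' (s+1) (r.set s (some o)) (by simp only [List.length_set]; omega)
        (by rw [List.filter_cons_of_pos (p := fun k => ex.contains k) hc] at hos; simp only [List.length_cons] at hos; omega)]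
      rw [pv_take_set r s (some o) (by omega)]
      have hfill : pvFillAlt (o :: os') (k :: ts) (PySem.List.dedup ex)
          = o :: pvFillAlt os' ts (PySem.List.dedup ex) := by
        simp [pvFillAlt, hc']
      rw [hfill]
      simp
    · -- fixed position
      have hc' : ¬ k ∈ ex := by simpa using hc
      have hav : pvAvL ex (k :: ts) (s : Int) = pvAvL ex ts ((s+1 : Nat) : Int) := by
        rw [pvAvL, PySem.List.enumerate_cons, hcast]
        simp [pvAvL, hc']
      have hr1 : pvR1 ex (PySem.List.enumerate (k :: ts) (s : Int)) r
          = pvR1 ex (PySem.List.enumerate ts ((s+1 : Nat) : Int)) (r.set s (some k)) := by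
        rw [PySem.List.enumerate_cons, pvR1, List.foldl_cons, if_neg hc, hcast]
        simp only [Int.toNat_natCast]
        rfl
      simp only [List.length_cons] at hr
      rw [hav, hr1, ih os (s+1) (r.set s (some k)) (by simp only [List.length_set]; omega)
        (by rw [List.filter_cons_of_neg (p := fun k => ex.contains k) hc] at hos; exact hos)]
      rw [pv_take_set r s (some k) (by omega)]
      have hfill : pvFillAlt os (k :: ts) (PySem.List.dedup ex)
          = k :: pvFillAlt os ts (PySem.List.dedup ex) := by
        cases os <;> simp [pvFillAlt, hc']
      rw [hfill]
      simp

-- A in terms of the helper functions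
lemma pv_A_closed (t ex : List String) :
    sort_list_by_exemplar_py t ex
      = (pvFillA
          (PySem.List.sorted (t.filter (fun k => ex.contains k)) (fun k => (PySem.List.index? ex k).getD 0) false)
          (pvAvL ex t 0)
          (pvR1 ex (PySem.List.enumerate t 0) (List.replicate t.length none))).map (fun o => o.getD "") := by
  unfold sort_list_by_exemplar_py pvFillA pvAvL pvR1
  rw [pv_split]
  have h := pv_sk_closed ex t 0
  simp only [List.nil_append, h]
  rfl

-- B in terms of the helper functions
lemma pv_B_closed (t ex : List String) :
    sort_list_by_exemplar_py_alt t ex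
      = pvFillAlt
          ((PySem.List.dedup ex).flatMap
            (fun e => List.replicate ((t.filter (fun k => ex.contains k)).count e) e))
          t (PySem.List.dedup ex) := by
  unfold sort_list_by_exemplar_py_alt
  simp only [pv_contains_dedup]
  rw [PySem.List.foldl_append_eq_flatMap, List.nil_append]
  congr 1
  apply List.flatMap_congr
  intro e _
  congr 1
  rw [← List.foldl_filter (p := fun k => ex.contains k)
        (f := fun (c : PySem.Dict String Int) k => c.insert k (c.getD k 0 + 1))]
  rw [PySem.Dict.getD_foldl_insert_add_one]
  simp

-- ===== VERDICT (by name: the statement is the Claim_ definition above) =====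
theorem sort_list_by_exemplar_py_spec : Claim_equal_sort_list_by_exemplar_py := by
  intro target exemplar _
  unfold Spec_sort_list_by_exemplar_py
  rw [pv_A_closed, pv_B_closed, pv_sorted_eq]
  have h := pv_main exemplar target
    ((PySem.List.dedup exemplar).flatMap
      (fun e => List.replicate ((target.filter (fun k => exemplar.contains k)).count e) e))
    0 (List.replicate target.length none)
    (by simp)
    (by rw [← pv_sorted_eq]; exact PySem.List.length_sorted _ _ _)
  simpa using h
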